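-- pv_equiv track=rewrite | github.com/yiichiu/HPS2013 | Evasion/hunter.py | getPreyArea
-- ===== SOURCE A (Python) =====
-- import copy
--
-- def getPreyArea(preyLocation, walls, newWall = []):
--   walls = copy.deepcopy(walls)
--   if newWall != []:
--     walls += [(-1, newWall[0], newWall[1])]
--   (xPrey, yPrey) = preyLocation
--   left = [x1
--           for (_, (x1, y1), (x2, y2)) in walls
--           if yPrey in range(y1, y2+1)
--           if xPrey > x1]
--   left = max(left+[0])
--
--   right = [x1
--            for (_, (x1, y1), (x2, y2)) in walls
--            if yPrey in range(y1, y2+1)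
--            if xPrey < x1]
--   right = min(right+[499])
--
--   up = [y1
--         for (_, (x1, y1), (x2, y2)) in walls
--         if xPrey in range(x1, x2+1)
--         if yPrey > y1]
--   up = max(up+[0])
--
--   down = [y1
--           for (_, (x1, y1), (x2, y2)) in walls
--           if xPrey in range(x1, x2+1)
--           if yPrey < y1]
--   down = min(down+[499])
--   area = abs(up-down+1) * abs(left-right+1)
--   return area
-- ===== SOURCE B (Python) =====
-- def _bisect_left(xs, v, lo, hi):
--   # recursive binary search: first index whose element is >= v
--   if hi <= lo:
--     return lo
--   mid = (lo + hi) // 2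
--   if xs[mid] < v:
--     return _bisect_left(xs, v, mid + 1, hi)
--   return _bisect_left(xs, v, lo, mid)
--
-- def _bisect_right(xs, v, lo, hi):
--   # recursive binary search: first index whose element is > v
--   if hi <= lo:
--     return lo
--   mid = (lo + hi) // 2
--   if xs[mid] <= v:
--     return _bisect_right(xs, v, mid + 1, hi)
--   return _bisect_right(xs, v, lo, mid)
--
-- def getPreyArea(preyLocation, walls, newWall = []):
--   (xPrey, yPrey) = preyLocation
--   allWalls = list(walls)
--   if newWall != []:
--     allWalls.append((-1, newWall[0], newWall[1]))
--   # sorted x-coordinates of walls crossing the prey's row, and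
--   # sorted y-coordinates of walls crossing the prey's column
--   rowXs = sorted(x1 for (_, (x1, y1), (x2, y2)) in allWalls if y1 <= yPrey <= y2)
--   colYs = sorted(y1 for (_, (x1, y1), (x2, y2)) in allWalls if x1 <= xPrey <= x2)
--   # predecessor/successor of the prey among those coordinates, clamped to the board
--   i = _bisect_left(rowXs, xPrey, 0, len(rowXs))
--   left = max(rowXs[i - 1], 0) if i > 0 else 0
--   j = _bisect_right(rowXs, xPrey, 0, len(rowXs))
--   right = min(rowXs[j], 499) if j < len(rowXs) else 499
--   u = _bisect_left(colYs, yPrey, 0, len(colYs))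
--   up = max(colYs[u - 1], 0) if u > 0 else 0
--   d = _bisect_right(colYs, yPrey, 0, len(colYs))
--   down = min(colYs[d], 499) if d < len(colYs) else 499
--   return abs(up - down + 1) * abs(left - right + 1)
-- ===== Notes on version B (the rewrite author's own statement) =====
-- stated objective: alternative
-- what changed: Instead of four filtered comprehensions each reduced by max/min, B builds two sorted coordinate lists (walls crossing the prey's row / column) and finds the bounding walls as the predecessor and successor of the prey by recursive binary search, clamping to the 0/499 board edges.
import Mathlib
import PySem

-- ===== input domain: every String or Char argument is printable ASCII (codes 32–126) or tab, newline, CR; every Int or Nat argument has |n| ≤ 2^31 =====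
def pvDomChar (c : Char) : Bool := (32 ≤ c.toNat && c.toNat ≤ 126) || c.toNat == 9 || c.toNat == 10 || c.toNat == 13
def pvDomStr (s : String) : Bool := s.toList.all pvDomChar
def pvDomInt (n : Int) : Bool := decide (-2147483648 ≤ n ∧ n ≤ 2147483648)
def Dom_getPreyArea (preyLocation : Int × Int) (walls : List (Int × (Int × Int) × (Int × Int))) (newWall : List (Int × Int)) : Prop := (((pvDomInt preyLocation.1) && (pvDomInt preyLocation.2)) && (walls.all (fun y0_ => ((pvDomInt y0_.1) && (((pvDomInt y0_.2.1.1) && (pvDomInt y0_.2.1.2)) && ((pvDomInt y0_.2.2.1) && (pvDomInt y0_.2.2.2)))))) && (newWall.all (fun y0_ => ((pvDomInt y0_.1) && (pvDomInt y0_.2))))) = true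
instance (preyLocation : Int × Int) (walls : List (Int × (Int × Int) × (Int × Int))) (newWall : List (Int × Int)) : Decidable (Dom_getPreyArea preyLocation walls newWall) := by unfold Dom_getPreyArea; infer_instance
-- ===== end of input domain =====

-- B replaces A's four filtered comprehensions reduced by max/min with two sorted
-- coordinate lists and recursive binary searches for the prey's predecessor/successor
-- (objective: alternative; return value only — A deep-copies 'walls', so its mutation is unobservable).

-- ===== PORT A =====
-- Python max(l+[0]) / min(l+[499]) of the comprehension result
def pyMaxD (l : List Int) (d : Int) : Int := (PySem.List.max? (l ++ [d]) (fun y => y)).getD d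
def pyMinD (l : List Int) (d : Int) : Int := (PySem.List.min? (l ++ [d]) (fun y => y)).getD d

def getPreyArea (preyLocation : Int × Int) (walls : List (Int × (Int × Int) × (Int × Int))) (newWall : List (Int × Int)) : Int :=
  let walls2 := if newWall ≠ [] then walls ++ [(-1, newWall.getD 0 (0, 0), newWall.getD 1 (0, 0))] else walls
  let xPrey := preyLocation.1
  let yPrey := preyLocation.2
  -- 'yPrey in range(y1, y2+1)' ported exactly as y1 ≤ yPrey ∧ yPrey ≤ y2
  let leftL := (walls2.filter (fun w => decide (w.2.1.2 ≤ yPrey ∧ yPrey ≤ w.2.2.2 ∧ w.2.1.1 < xPrey))).map (fun w => w.2.1.1)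
  let left := pyMaxD leftL 0
  let rightL := (walls2.filter (fun w => decide (w.2.1.2 ≤ yPrey ∧ yPrey ≤ w.2.2.2 ∧ xPrey < w.2.1.1))).map (fun w => w.2.1.1)
  let right := pyMinD rightL 499
  let upL := (walls2.filter (fun w => decide (w.2.1.1 ≤ xPrey ∧ xPrey ≤ w.2.2.1 ∧ w.2.1.2 < yPrey))).map (fun w => w.2.1.2)
  let up := pyMaxD upL 0
  let downL := (walls2.filter (fun w => decide (w.2.1.1 ≤ xPrey ∧ xPrey ≤ w.2.2.1 ∧ yPrey < w.2.1.2))).map (fun w => w.2.1.2)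
  let down := pyMinD downL 499
  |up - down + 1| * |left - right + 1|

-- ===== PORT B =====
-- recursive binary search, Source B's _bisect_left (indices in range on every call B makes;
-- xs[mid] is ported totally with default 0, exact since 0 ≤ lo ≤ mid < hi ≤ len xs there)
def pvBL (xs : List Int) (v lo hi : Int) : Int :=
  if hle : hi ≤ lo then lo
  else
    let mid := PySem.Int.floordiv (lo + hi) 2
    have hmid : lo ≤ mid ∧ mid < hi :=
      ⟨(PySem.Int.floordiv_two_mid_bounds (by omega)).1,
       (PySem.Int.floordiv_lt_iff_lt_mul (by omega)).2 (by omega)⟩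
    if PySem.List.pyGetD xs mid 0 < v then pvBL xs v (mid + 1) hi
    else pvBL xs v lo mid
termination_by (hi - lo).toNat
decreasing_by all_goals omega

-- Source B's _bisect_right
def pvBR (xs : List Int) (v lo hi : Int) : Int :=
  if hle : hi ≤ lo then lo
  else
    let mid := PySem.Int.floordiv (lo + hi) 2
    have hmid : lo ≤ mid ∧ mid < hi :=
      ⟨(PySem.Int.floordiv_two_mid_bounds (by omega)).1,
       (PySem.Int.floordiv_lt_iff_lt_mul (by omega)).2 (by omega)⟩
    if PySem.List.pyGetD xs mid 0 ≤ v then pvBR xs v (mid + 1) hi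
    else pvBR xs v lo mid
termination_by (hi - lo).toNat
decreasing_by all_goals omega

def getPreyArea_alt (preyLocation : Int × Int) (walls : List (Int × (Int × Int) × (Int × Int))) (newWall : List (Int × Int)) : Int :=
  let xPrey := preyLocation.1
  let yPrey := preyLocation.2
  let allWalls := if newWall ≠ [] then walls ++ [(-1, newWall.getD 0 (0, 0), newWall.getD 1 (0, 0))] else walls
  let rowXs := PySem.List.sorted ((allWalls.filter (fun w => decide (w.2.1.2 ≤ yPrey ∧ yPrey ≤ w.2.2.2))).map (fun w => w.2.1.1)) (fun x => x) false
  let colYs := PySem.List.sorted ((allWalls.filter (fun w => decide (w.2.1.1 ≤ xPrey ∧ xPrey ≤ w.2.2.1))).map (fun w => w.2.1.2)) (fun x => x) false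
  let i := pvBL rowXs xPrey 0 (PySem.List.len rowXs)
  let left := if 0 < i then max (PySem.List.pyGetD rowXs (i - 1) 0) 0 else 0
  let j := pvBR rowXs xPrey 0 (PySem.List.len rowXs)
  let right := if j < PySem.List.len rowXs then min (PySem.List.pyGetD rowXs j 0) 499 else 499
  let u := pvBL colYs yPrey 0 (PySem.List.len colYs)
  let up := if 0 < u then max (PySem.List.pyGetD colYs (u - 1) 0) 0 else 0
  let d := pvBR colYs yPrey 0 (PySem.List.len colYs)
  let down := if d < PySem.List.len colYs then min (PySem.List.pyGetD colYs d 0) 499 else 499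
  |up - down + 1| * |left - right + 1|

-- ===== PRECONDITION & SPEC =====
-- Pre_ excludes only inputs where A raises: a nonempty newWall of length 1 makes newWall[1] an IndexError (B raises there too).
def Pre_getPreyArea (preyLocation : Int × Int) (walls : List (Int × (Int × Int) × (Int × Int))) (newWall : List (Int × Int)) : Prop :=
  newWall = [] ∨ 2 ≤ newWall.length
instance (preyLocation : Int × Int) (walls : List (Int × (Int × Int) × (Int × Int))) (newWall : List (Int × Int)) : Decidable (Pre_getPreyArea preyLocation walls newWall) := by unfold Pre_getPreyArea; infer_instance
def pvWitness_getPreyArea : (Int × Int) × (List (Int × (Int × Int) × (Int × Int))) × (List (Int × Int)) :=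
  ((3, 4), [(0, (1, 1), (10, 1))], [])
def Spec_getPreyArea (preyLocation : Int × Int) (walls : List (Int × (Int × Int) × (Int × Int))) (newWall : List (Int × Int)) (out : Int) : Prop := out = getPreyArea_alt preyLocation walls newWall
instance (preyLocation : Int × Int) (walls : List (Int × (Int × Int) × (Int × Int))) (newWall : List (Int × Int)) (out : Int) : Decidable (Spec_getPreyArea preyLocation walls newWall out) := by unfold Spec_getPreyArea; infer_instance

-- ===== CLAIM =====
def Claim_equal_getPreyArea : Prop := ∀ (preyLocation : Int × Int) (walls : List (Int × (Int × Int) × (Int × Int))) (newWall : List (Int × Int)), Dom_getPreyArea preyLocation walls newWall → Pre_getPreyArea preyLocation walls newWall → Spec_getPreyArea preyLocation walls newWall (getPreyArea preyLocation walls newWall)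

-- ===== LEMMAS AND PROOFS =====

theorem foldl_max_pull (t : List Int) : ∀ a b : Int, t.foldl max (max a b) = max (t.foldl max a) b := by
  induction t with
  | nil => intro a b; rfl
  | cons y t ih =>
    intro a b
    simp only [List.foldl_cons]
    rw [max_right_comm, ih]

theorem foldl_min_pull (t : List Int) : ∀ a b : Int, t.foldl min (min a b) = min (t.foldl min a) b := by
  induction t with
  | nil => intro a b; rfl
  | cons y t ih =>
    intro a b
    simp only [List.foldl_cons]
    rw [min_right_comm, ih]

theorem pyMaxD_eq (l : List Int) (d : Int) : pyMaxD l d = l.foldl max d := by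
  cases l with
  | nil => simp [pyMaxD, PySem.List.max?_id_cons]
  | cons x t =>
    simp only [pyMaxD, List.cons_append, PySem.List.max?_id_cons, Option.getD_some,
      List.foldl_append, List.foldl_cons, List.foldl_nil]
    rw [max_comm d x, ← foldl_max_pull]

theorem pyMinD_eq (l : List Int) (d : Int) : pyMinD l d = l.foldl min d := by
  cases l with
  | nil => simp [pyMinD, PySem.List.min?_id_cons]
  | cons x t =>
    simp only [pyMinD, List.cons_append, PySem.List.min?_id_cons, Option.getD_some,
      List.foldl_append, List.foldl_cons, List.foldl_nil]
    rw [min_comm d x, ← foldl_min_pull]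

-- splitting A's three-condition filters into B's row/column filter followed by a value filter
theorem split_lt (W : List (Int × (Int × Int) × (Int × Int))) (f g h : (Int × (Int × Int) × (Int × Int)) → Int) (a v : Int) :
    (W.filter (fun w => decide (f w ≤ a ∧ a ≤ g w ∧ h w < v))).map h
      = ((W.filter (fun w => decide (f w ≤ a ∧ a ≤ g w))).map h).filter (fun x => decide (x < v)) := by
  induction W with
  | nil => rfl
  | cons b t ih =>
    simp only [Bool.decide_and] at ih ⊢
    by_cases h1 : f b ≤ a <;> by_cases h2 : a ≤ g b <;> by_cases h3 : h b < v <;>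
      simp [h1, h2, h3, ih]

theorem split_gt (W : List (Int × (Int × Int) × (Int × Int))) (f g h : (Int × (Int × Int) × (Int × Int)) → Int) (a v : Int) :
    (W.filter (fun w => decide (f w ≤ a ∧ a ≤ g w ∧ v < h w))).map h
      = ((W.filter (fun w => decide (f w ≤ a ∧ a ≤ g w))).map h).filter (fun x => decide (v < x)) := by
  induction W with
  | nil => rfl
  | cons b t ih =>
    simp only [Bool.decide_and] at ih ⊢
    by_cases h1 : f b ≤ a <;> by_cases h2 : a ≤ g b <;> by_cases h3 : v < h b <;>
      simp [h1, h2, h3, ih]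

-- monotone indexing into a sorted list
theorem getElem_mono_sorted (xs : List Int) (hpw : xs.Pairwise (· ≤ ·)) {j k : Nat}
    (hjk : j ≤ k) (hk : k < xs.length) : xs[j]'(Nat.lt_of_le_of_lt hjk hk) ≤ xs[k] := by
  rcases Nat.lt_or_ge j k with h | h
  · exact (List.pairwise_iff_getElem.1 hpw) j k (by omega) hk h
  · have : j = k := by omega
    subst this; exact le_refl _

theorem getD_mono (xs : List Int) (hpw : xs.Pairwise (· ≤ ·)) (j k : Nat)
    (hjk : j ≤ k) (hk : k < xs.length) : xs.getD j 0 ≤ xs.getD k 0 := by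
  rw [List.getD_eq_getElem xs 0 (by omega), List.getD_eq_getElem xs 0 hk]
  rcases Nat.lt_or_ge j k with h | h
  · exact (List.pairwise_iff_getElem.1 hpw) j k (by omega) hk h
  · have : j = k := by omega
    subst this; exact le_refl _

theorem pvBL_spec (xs : List Int) (v : Int) (hpw : xs.Pairwise (· ≤ ·)) :
    ∀ (n : Nat) (lo hi : Int), (hi - lo).toNat = n → 0 ≤ lo → lo ≤ hi → hi ≤ (xs.length : Int) →
      lo ≤ pvBL xs v lo hi ∧ pvBL xs v lo hi ≤ hi ∧
      (∀ j : Nat, lo ≤ (j : Int) → (j : Int) < pvBL xs v lo hi → xs.getD j 0 < v) ∧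
      (∀ j : Nat, pvBL xs v lo hi ≤ (j : Int) → (j : Int) < hi → v ≤ xs.getD j 0) := by
  intro n
  induction n using Nat.strong_induction_on with
  | _ n ih =>
    intro lo hi hn hlo hlh hhi
    rw [pvBL]
    by_cases hle : hi ≤ lo
    · simp only [hle, dif_pos]
      refine ⟨le_refl _, by omega, ?_, ?_⟩ <;> intro j h1 h2 <;> omega
    · simp only [hle, dif_neg, not_false_iff]
      set mid := PySem.Int.floordiv (lo + hi) 2 with hmiddef
      have hmid : lo ≤ mid ∧ mid < hi :=
        ⟨(PySem.Int.floordiv_two_mid_bounds (by omega)).1,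
         (PySem.Int.floordiv_lt_iff_lt_mul (by omega)).2 (by omega)⟩
      have hget : PySem.List.pyGetD xs mid 0 = xs.getD mid.toNat 0 := by
        rw [PySem.List.pyGetD_eq_getElem xs 0 (by omega) (by omega),
          List.getD_eq_getElem xs 0 (by omega)]
      by_cases hc : PySem.List.pyGetD xs mid 0 < v
      · simp only [hc, if_pos]
        obtain ⟨b1, b2, b3, b4⟩ := ih (hi - (mid + 1)).toNat (by omega) (mid + 1) hi rfl
          (by omega) (by omega) hhi
        refine ⟨by omega, b2, ?_, b4⟩
        intro j h1 h2
        by_cases hj : (j : Int) ≤ mid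
        · calc xs.getD j 0 ≤ xs.getD mid.toNat 0 :=
                getD_mono xs hpw j mid.toNat (by omega) (by omega)
            _ < v := by rw [← hget]; exact hc
        · exact b3 j (by omega) h2
      · simp only [hc, if_neg, not_false_iff]
        obtain ⟨b1, b2, b3, b4⟩ := ih (mid - lo).toNat (by omega) lo mid rfl
          hlo (by omega) (by omega)
        refine ⟨b1, by omega, b3, ?_⟩
        intro j h1 h2
        by_cases hj : (j : Int) < mid
        · exact b4 j h1 hj
        · calc v ≤ xs.getD mid.toNat 0 := by rw [← hget]; omega
            _ ≤ xs.getD j 0 := getD_mono xs hpw mid.toNat j (by omega) (by omega)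

theorem pvBR_spec (xs : List Int) (v : Int) (hpw : xs.Pairwise (· ≤ ·)) :
    ∀ (n : Nat) (lo hi : Int), (hi - lo).toNat = n → 0 ≤ lo → lo ≤ hi → hi ≤ (xs.length : Int) →
      lo ≤ pvBR xs v lo hi ∧ pvBR xs v lo hi ≤ hi ∧
      (∀ j : Nat, lo ≤ (j : Int) → (j : Int) < pvBR xs v lo hi → xs.getD j 0 ≤ v) ∧
      (∀ j : Nat, pvBR xs v lo hi ≤ (j : Int) → (j : Int) < hi → v < xs.getD j 0) := by
  intro n
  induction n using Nat.strong_induction_on with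
  | _ n ih =>
    intro lo hi hn hlo hlh hhi
    rw [pvBR]
    by_cases hle : hi ≤ lo
    · simp only [hle, dif_pos]
      refine ⟨le_refl _, by omega, ?_, ?_⟩ <;> intro j h1 h2 <;> omega
    · simp only [hle, dif_neg, not_false_iff]
      set mid := PySem.Int.floordiv (lo + hi) 2 with hmiddef
      have hmid : lo ≤ mid ∧ mid < hi :=
        ⟨(PySem.Int.floordiv_two_mid_bounds (by omega)).1,
         (PySem.Int.floordiv_lt_iff_lt_mul (by omega)).2 (by omega)⟩
      have hget : PySem.List.pyGetD xs mid 0 = xs.getD mid.toNat 0 := by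
        rw [PySem.List.pyGetD_eq_getElem xs 0 (by omega) (by omega),
          List.getD_eq_getElem xs 0 (by omega)]
      by_cases hc : PySem.List.pyGetD xs mid 0 ≤ v
      · simp only [hc, if_pos]
        obtain ⟨b1, b2, b3, b4⟩ := ih (hi - (mid + 1)).toNat (by omega) (mid + 1) hi rfl
          (by omega) (by omega) hhi
        refine ⟨by omega, b2, ?_, b4⟩
        intro j h1 h2
        by_cases hj : (j : Int) ≤ mid
        · calc xs.getD j 0 ≤ xs.getD mid.toNat 0 :=
                getD_mono xs hpw j mid.toNat (by omega) (by omega)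
            _ ≤ v := by rw [← hget]; exact hc
        · exact b3 j (by omega) h2
      · simp only [hc, if_neg, not_false_iff]
        obtain ⟨b1, b2, b3, b4⟩ := ih (mid - lo).toNat (by omega) lo mid rfl
          hlo (by omega) (by omega)
        refine ⟨b1, by omega, b3, ?_⟩
        intro j h1 h2
        by_cases hj : (j : Int) < mid
        · exact b4 j h1 hj
        · calc v < xs.getD mid.toNat 0 := by rw [← hget]; omega
            _ ≤ xs.getD j 0 := getD_mono xs hpw mid.toNat j (by omega) (by omega)

-- a predicate that holds exactly on a prefix of indices filters to that prefix
theorem filter_eq_take (xs : List Int) (p : Int → Bool) :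
    ∀ r : Nat, r ≤ xs.length →
      (∀ j : Nat, j < r → p (xs.getD j 0) = true) →
      (∀ j : Nat, r ≤ j → j < xs.length → p (xs.getD j 0) = false) →
      xs.filter p = xs.take r := by
  induction xs with
  | nil =>
    intro r hr _ _
    have : r = 0 := by simpa using hr
    subst this; rfl
  | cons a t ih =>
    intro r hr h1 h2
    cases r with
    | zero =>
      simp only [List.take_zero]
      rw [List.filter_eq_nil_iff]
      intro x hx
      obtain ⟨k, hk, hxk⟩ := List.mem_iff_getElem.1 hx
      have := h2 k (by omega) (by simpa using hk)
      rw [List.getD_eq_getElem _ 0 (by simpa using hk)] at this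
      simp [hxk] at this
      simp [this]
    | succ r' =>
      have ha : p a = true := by have := h1 0 (by omega); simpa using this
      simp only [List.filter_cons, ha, if_pos, List.take_succ_cons]
      congr 1
      exact ih r' (by simpa using hr)
        (fun j hj => by have := h1 (j + 1) (by omega); simpa using this)
        (fun j hj1 hj2 => by have := h2 (j + 1) (by omega) (by simpa using hj2); simpa using this)

-- a predicate that holds exactly on a suffix of indices filters to that suffix
theorem filter_eq_drop (xs : List Int) (p : Int → Bool) :
    ∀ r : Nat, r ≤ xs.length →
      (∀ j : Nat, j < r → p (xs.getD j 0) = false) →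
      (∀ j : Nat, r ≤ j → j < xs.length → p (xs.getD j 0) = true) →
      xs.filter p = xs.drop r := by
  induction xs with
  | nil =>
    intro r hr _ _
    have : r = 0 := by simpa using hr
    subst this; rfl
  | cons a t ih =>
    intro r hr h1 h2
    cases r with
    | zero =>
      simp only [List.drop_zero]
      rw [List.filter_eq_self]
      intro x hx
      obtain ⟨k, hk, hxk⟩ := List.mem_iff_getElem.1 hx
      have := h2 k (by omega) (by simpa using hk)
      rw [List.getD_eq_getElem _ 0 (by simpa using hk)] at this
      simpa [hxk] using this
    | succ r' =>
      have ha : p a = false := by have := h1 0 (by omega); simpa using this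
      simp only [List.filter_cons, ha, List.drop_succ_cons]
      simp only [Bool.false_eq_true, if_false]
      exact ih r' (by simpa using hr)
        (fun j hj => by have := h1 (j + 1) (by omega); simpa using this)
        (fun j hj1 hj2 => by have := h2 (j + 1) (by omega) (by simpa using hj2); simpa using this)

-- max over a sorted prefix is its last element (joined with the default 0)
theorem foldl_max_take (xs : List Int) (hpw : xs.Pairwise (· ≤ ·)) (r : Nat)
    (h0 : 0 < r) (hr : r ≤ xs.length) :
    (xs.take r).foldl max 0 = max (xs.getD (r - 1) 0) 0 := by
  have hlen : (xs.take r).length = r := by simp [List.length_take]; omega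
  have hmem : xs.getD (r - 1) 0 ∈ xs.take r := by
    rw [List.getD_eq_getElem xs 0 (by omega)]
    have : (xs.take r)[r - 1]'(by omega) = xs[r - 1] := List.getElem_take
    rw [← this]
    exact List.getElem_mem _
  apply le_antisymm
  · rcases PySem.List.foldl_max_mem (xs.take r) 0 with h | h
    · rw [h]; exact le_max_right _ _
    · obtain ⟨k, hk, hxk⟩ := List.mem_iff_getElem.1 h
      rw [← hxk, List.getElem_take]
      refine le_trans ?_ (le_max_left _ _)
      rw [List.getD_eq_getElem xs 0 (by omega)]
      exact getElem_mono_sorted xs hpw (by omega) (by omega)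
  · exact max_le ((PySem.List.le_foldl_max (xs.take r) 0).2 _ hmem)
      ((PySem.List.le_foldl_max (xs.take r) 0).1)

-- min over a sorted suffix is its first element (joined with the default 499)
theorem foldl_min_drop (xs : List Int) (hpw : xs.Pairwise (· ≤ ·)) (r : Nat)
    (hr : r < xs.length) :
    (xs.drop r).foldl min 499 = min (xs.getD r 0) 499 := by
  have hmem : xs.getD r 0 ∈ xs.drop r := by
    rw [List.getD_eq_getElem xs 0 hr]
    have : (xs.drop r)[0]'(by simp [List.length_drop]; omega) = xs[r + 0]'(by omega) :=
      List.getElem_drop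
    simp only [Nat.add_zero] at this
    rw [← this]
    exact List.getElem_mem _
  apply le_antisymm
  · exact le_min ((PySem.List.foldl_min_le (xs.drop r) 499).2 _ hmem)
      ((PySem.List.foldl_min_le (xs.drop r) 499).1)
  · rcases PySem.List.foldl_min_mem (xs.drop r) 499 with h | h
    · rw [h]; exact min_le_right _ _
    · obtain ⟨k, hk, hxk⟩ := List.mem_iff_getElem.1 h
      rw [← hxk, List.getElem_drop]
      refine le_trans (min_le_left _ _) ?_
      rw [List.getD_eq_getElem xs 0 hr]
      exact getElem_mono_sorted xs hpw (by omega) (by simp [List.length_drop] at hk; omega)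

-- A's running max over the values below v equals B's clamped predecessor via binary search
theorem bl_max (cs : List Int) (v : Int) :
    (cs.filter (fun x => decide (x < v))).foldl max 0 =
      (let xs := PySem.List.sorted cs (fun x => x) false
       let i := pvBL xs v 0 (PySem.List.len xs)
       if 0 < i then max (PySem.List.pyGetD xs (i - 1) 0) 0 else 0) := by
  set xs := PySem.List.sorted cs (fun x => x) false with hxs
  have hperm : xs.Perm cs := PySem.List.sorted_perm cs (fun x => x) false
  have hpw : xs.Pairwise (· ≤ ·) := PySem.List.sorted_pairwise cs (fun x => x)
  obtain ⟨b1, b2, b3, b4⟩ := pvBL_spec xs v hpw ((xs.length : Int) - 0).toNat 0 (xs.length) rfl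
    (by omega) (by omega) (by omega)
  set i := pvBL xs v 0 (xs.length) with hidef
  have hfoldperm : (cs.filter (fun x => decide (x < v))).foldl max 0
      = (xs.filter (fun x => decide (x < v))).foldl max 0 :=
    List.Perm.foldl_eq (rcomm := ⟨fun a b c => max_right_comm a b c⟩)
      ((hperm.filter _).symm) 0
  have hfilter : xs.filter (fun x => decide (x < v)) = xs.take i.toNat := by
    apply filter_eq_take xs _ i.toNat (by omega)
    · intro j hj
      simpa using b3 j (by omega) (by omega)
    · intro j hj1 hj2
      simpa using not_lt.2 (b4 j (by omega) (by omega))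
  rw [hfoldperm, hfilter]
  simp only [PySem.List.len_eq, ← hidef]
  by_cases hi : 0 < i
  · rw [if_pos hi, foldl_max_take xs hpw i.toNat (by omega) (by omega)]
    congr 1
    rw [PySem.List.pyGetD_eq_getElem xs 0 (by omega) (by omega),
      List.getD_eq_getElem xs 0 (by omega)]
    congr 1
    omega
  · rw [if_neg hi]
    have : i = 0 := by omega
    rw [this]
    rfl

-- A's running min over the values above v equals B's clamped successor via binary search
theorem br_min (cs : List Int) (v : Int) :
    (cs.filter (fun x => decide (v < x))).foldl min 499 =
      (let xs := PySem.List.sorted cs (fun x => x) false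
       let j := pvBR xs v 0 (PySem.List.len xs)
       if j < PySem.List.len xs then min (PySem.List.pyGetD xs j 0) 499 else 499) := by
  set xs := PySem.List.sorted cs (fun x => x) false with hxs
  have hperm : xs.Perm cs := PySem.List.sorted_perm cs (fun x => x) false
  have hpw : xs.Pairwise (· ≤ ·) := PySem.List.sorted_pairwise cs (fun x => x)
  obtain ⟨b1, b2, b3, b4⟩ := pvBR_spec xs v hpw ((xs.length : Int) - 0).toNat 0 (xs.length) rfl
    (by omega) (by omega) (by omega)
  set j := pvBR xs v 0 (xs.length) with hjdef
  have hfoldperm : (cs.filter (fun x => decide (v < x))).foldl min 499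
      = (xs.filter (fun x => decide (v < x))).foldl min 499 :=
    List.Perm.foldl_eq (rcomm := ⟨fun a b c => min_right_comm a b c⟩)
      ((hperm.filter _).symm) 499
  have hfilter : xs.filter (fun x => decide (v < x)) = xs.drop j.toNat := by
    apply filter_eq_drop xs _ j.toNat (by omega)
    · intro k hk
      simpa using not_lt.2 (b3 k (by omega) (by omega))
    · intro k hk1 hk2
      simpa using b4 k (by omega) (by omega)
  rw [hfoldperm, hfilter]
  simp only [PySem.List.len_eq, ← hjdef]
  by_cases hj : j < (xs.length : Int)
  · rw [if_pos hj, foldl_min_drop xs hpw j.toNat (by omega)]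
    congr 1
    rw [PySem.List.pyGetD_eq_getElem xs 0 (by omega) (by omega),
      List.getD_eq_getElem xs 0 (by omega)]
  · rw [if_neg hj]
    have : j.toNat = xs.length := by omega
    rw [this, List.drop_length]
    rfl

-- ===== VERDICT =====
theorem getPreyArea_spec : Claim_equal_getPreyArea := by
  intro p walls newWall _ _
  unfold Spec_getPreyArea getPreyArea getPreyArea_alt
  simp only [pyMaxD_eq, pyMinD_eq]
  rw [split_lt _ (fun w => w.2.1.2) (fun w => w.2.2.2) (fun w => w.2.1.1) p.2 p.1,
    split_gt _ (fun w => w.2.1.2) (fun w => w.2.2.2) (fun w => w.2.1.1) p.2 p.1,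
    split_lt _ (fun w => w.2.1.1) (fun w => w.2.2.1) (fun w => w.2.1.2) p.1 p.2,
    split_gt _ (fun w => w.2.1.1) (fun w => w.2.2.1) (fun w => w.2.1.2) p.1 p.2,
    bl_max, br_min, bl_max, br_min]
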